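-- pv_equiv track=rewrite | github.com/Bhargavi2212/Context-engine | backend/app/services/csv_service.py | detect_column_mapping
-- ===== SOURCE A (Python) =====
-- FEEDBACK_HEADER_MAP: dict[str, list[str]] = {
--     "text": [
--         "feedback", "message", "text", "description", "content", "body",
--         "comment", "note", "review", "request", "review_text",
--     ],
--     "source": ["source", "source_type", "channel", "origin", "type"],
--     "customer_name": ["company", "customer", "organization", "org", "account", "company_name"],
--     "author_name": ["name", "author", "user", "reviewer", "submitter"],
--     "rating": ["rating", "score", "stars", "nps"],
--     "created_at": ["date", "created", "created_at", "timestamp", "time", "submitted"],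
-- }
--
-- CUSTOMER_HEADER_MAP: dict[str, list[str]] = {
--     "company_name": [
--         "company", "company_name", "customer", "organization", "org",
--         "account", "name",
--     ],
--     "segment": ["segment", "tier", "type", "plan_type", "customer_type"],
--     "plan": ["plan", "plan_name", "subscription", "product"],
--     "mrr": ["mrr", "monthly_revenue", "monthly"],
--     "arr": ["arr", "annual_revenue", "annual", "revenue"],
--     "account_manager": ["manager", "account_manager", "owner", "csm", "am"],
--     "renewal_date": ["renewal", "renewal_date", "contract_end", "expiry"],
--     "health_score": ["health", "health_score", "score", "nps"],
--     "industry": ["industry", "vertical", "sector"],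
--     "employee_count": ["employees", "employee_count", "company_size", "size"],
-- }
--
-- def _match_header(our_field: str, headers: list[str], mapping: dict[str, list[str]]) -> str | None:
--     """Match CSV header to our field using keyword mapping. Case-insensitive."""
--     keywords = mapping.get(our_field, [])
--     keywords_lower = {k.lower() for k in keywords}
--     for h in headers:
--         if not h:
--             continue
--         h_clean = h.strip().lower()
--         if h_clean in keywords_lower:
--             return h.strip()
--         for kw in keywords_lower:
--             if kw in h_clean:
--                 return h.strip()
--         words = h_clean.replace("-", " ").replace("_", " ").split()
--         if any(w in keywords_lower for w in words):
--             return h.strip()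
--     return None
--
-- def detect_column_mapping(headers: list[str], for_feedback: bool = True) -> dict[str, str | None]:
--     """Auto-detect column names (case-insensitive). Returns our_field -> csv_column."""
--     mapping = FEEDBACK_HEADER_MAP if for_feedback else CUSTOMER_HEADER_MAP
--     result: dict[str, str | None] = {}
--     for our_field in mapping:
--         matched = _match_header(our_field, headers, mapping)
--         result[our_field] = matched
--     first = next((h.strip() for h in headers if h and h.strip()), None)
--     key = "text" if for_feedback else "company_name"
--     if first and not result.get(key):
--         result[key] = first
--     return result
-- ===== SOURCE B (Python) =====
-- FEEDBACK_HEADER_MAP: dict[str, list[str]] = {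
--     "text": [
--         "feedback", "message", "text", "description", "content", "body",
--         "comment", "note", "review", "request", "review_text",
--     ],
--     "source": ["source", "source_type", "channel", "origin", "type"],
--     "customer_name": ["company", "customer", "organization", "org", "account", "company_name"],
--     "author_name": ["name", "author", "user", "reviewer", "submitter"],
--     "rating": ["rating", "score", "stars", "nps"],
--     "created_at": ["date", "created", "created_at", "timestamp", "time", "submitted"],
-- }
--
-- CUSTOMER_HEADER_MAP: dict[str, list[str]] = {
--     "company_name": [
--         "company", "company_name", "customer", "organization", "org",
--         "account", "name",
--     ],
--     "segment": ["segment", "tier", "type", "plan_type", "customer_type"],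
--     "plan": ["plan", "plan_name", "subscription", "product"],
--     "mrr": ["mrr", "monthly_revenue", "monthly"],
--     "arr": ["arr", "annual_revenue", "annual", "revenue"],
--     "account_manager": ["manager", "account_manager", "owner", "csm", "am"],
--     "renewal_date": ["renewal", "renewal_date", "contract_end", "expiry"],
--     "health_score": ["health", "health_score", "score", "nps"],
--     "industry": ["industry", "vertical", "sector"],
--     "employee_count": ["employees", "employee_count", "company_size", "size"],
-- }
--
--
-- def _hits(kws: set, hl: str, words: list) -> bool:
--     """Does a cleaned header hl (with its split words) match a lowered keyword set?"""
--     return hl in kws or any(k in hl for k in kws) or any(w in kws for w in words)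
--
--
-- def detect_column_mapping(headers: list[str], for_feedback: bool = True) -> dict[str, str | None]:
--     """Auto-detect column names in a SINGLE pass over the headers (earlier headers win)."""
--     mapping = FEEDBACK_HEADER_MAP if for_feedback else CUSTOMER_HEADER_MAP
--     # state: (our_field, lowered keyword set, detected column or None), in mapping order
--     state = [(f, {k.lower() for k in kws}, None) for f, kws in mapping.items()]
--     first = None
--     for h in headers:
--         if first is not None and all(o is not None for _, _, o in state):
--             break
--         if not h:
--             continue
--         hs = h.strip()
--         if first is None and hs:
--             first = hs
--         hl = hs.lower()
--         words = hl.replace("-", " ").replace("_", " ").split()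
--         state = [
--             (f, kws, o if o is not None else (hs if _hits(kws, hl, words) else None))
--             for f, kws, o in state
--         ]
--     key = "text" if for_feedback else "company_name"
--     return {f: (first if f == key and first and not o else o) for f, _, o in state}
-- ===== Notes on version B (the rewrite author's own statement) =====
-- stated objective: alternative
-- what changed: A rescans the full header list once per field (per-field nested scans plus a separate scan for the fallback header); B makes a single pass over the headers, filling every still-unassigned field as each header is seen and picking up the fallback first header in the same pass.
import Mathlib
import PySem

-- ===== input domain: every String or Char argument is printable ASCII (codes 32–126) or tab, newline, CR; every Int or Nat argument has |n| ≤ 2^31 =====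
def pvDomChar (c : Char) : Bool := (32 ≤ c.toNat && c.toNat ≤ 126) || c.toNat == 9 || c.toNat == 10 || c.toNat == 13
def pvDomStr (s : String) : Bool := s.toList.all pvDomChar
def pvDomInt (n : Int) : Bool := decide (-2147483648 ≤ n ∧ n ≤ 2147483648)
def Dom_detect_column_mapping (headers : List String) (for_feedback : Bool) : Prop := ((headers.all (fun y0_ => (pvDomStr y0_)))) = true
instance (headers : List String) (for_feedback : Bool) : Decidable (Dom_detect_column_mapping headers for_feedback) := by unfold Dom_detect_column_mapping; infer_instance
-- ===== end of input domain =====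

-- B replaces A's per-field rescans of the header list by ONE pass over the headers that fills every
-- still-unassigned field (alternative decomposition; same return value).

-- ===== PORT A =====
-- module constants (shared by both Pythons)
def pvFEEDBACK_HEADER_MAP : PySem.Dict String (List String) := PySem.Dict.mk [
  ("text", ["feedback", "message", "text", "description", "content", "body",
            "comment", "note", "review", "request", "review_text"]),
  ("source", ["source", "source_type", "channel", "origin", "type"]),
  ("customer_name", ["company", "customer", "organization", "org", "account", "company_name"]),
  ("author_name", ["name", "author", "user", "reviewer", "submitter"]),
  ("rating", ["rating", "score", "stars", "nps"]),
  ("created_at", ["date", "created", "created_at", "timestamp", "time", "submitted"])]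

def pvCUSTOMER_HEADER_MAP : PySem.Dict String (List String) := PySem.Dict.mk [
  ("company_name", ["company", "company_name", "customer", "organization", "org", "account", "name"]),
  ("segment", ["segment", "tier", "type", "plan_type", "customer_type"]),
  ("plan", ["plan", "plan_name", "subscription", "product"]),
  ("mrr", ["mrr", "monthly_revenue", "monthly"]),
  ("arr", ["arr", "annual_revenue", "annual", "revenue"]),
  ("account_manager", ["manager", "account_manager", "owner", "csm", "am"]),
  ("renewal_date", ["renewal", "renewal_date", "contract_end", "expiry"]),
  ("health_score", ["health", "health_score", "score", "nps"]),
  ("industry", ["industry", "vertical", "sector"]),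
  ("employee_count", ["employees", "employee_count", "company_size", "size"])]

-- {k.lower() for k in keywords}  (the same comprehension appears in both Pythons)
def pvLowerSet (keywords : List String) : List String :=
  PySem.Set.ofList (keywords.map PySem.Str.lower)

-- h_clean.replace("-", " ").replace("_", " ").split()  (identical line in both Pythons)
def pvWords (hc : String) : List String :=
  PySem.Str.split₀ (PySem.Str.replace (PySem.Str.replace hc "-" " ") "_" " ")

-- Python truthiness of a str-or-None value (used by both Pythons' `if first and not …`)
def pvTruthy (o : Option String) : Bool :=
  match o with
  | none => false
  | some s => !(s == "")

-- the header loop inside _match_header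
def pvMatchGo (kws : List String) : List String → Option String
  | [] => none
  | h :: rest =>
    if h = "" then pvMatchGo kws rest
    else
      let hc := PySem.Str.lower (PySem.Str.strip h)
      if kws.contains hc then some (PySem.Str.strip h)
      else if kws.any (fun kw => PySem.Str.isIn kw hc) then some (PySem.Str.strip h)
      else if (pvWords hc).any (fun w => kws.contains w) then some (PySem.Str.strip h)
      else pvMatchGo kws rest

-- _match_header(our_field, headers, mapping)
def pvMatchHeader (our_field : String) (headers : List String)
    (mapping : PySem.Dict String (List String)) : Option String :=
  pvMatchGo (pvLowerSet (PySem.Dict.getD mapping our_field [])) headers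

-- next((h.strip() for h in headers if h and h.strip()), None)
def pvFirstHeader : List String → Option String
  | [] => none
  | h :: t => if h != "" && PySem.Str.strip h != "" then some (PySem.Str.strip h) else pvFirstHeader t

def detect_column_mapping (headers : List String) (for_feedback : Bool) : List (String × Option String) :=
  let mapping := if for_feedback then pvFEEDBACK_HEADER_MAP else pvCUSTOMER_HEADER_MAP
  let result := (PySem.Dict.keys mapping).foldl
    (fun r our_field => PySem.Dict.insert r our_field (pvMatchHeader our_field headers mapping))
    PySem.Dict.empty
  let first := pvFirstHeader headers
  let key := if for_feedback then "text" else "company_name"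
  let result := if pvTruthy first && !pvTruthy (PySem.Dict.getD result key none)
    then PySem.Dict.insert result key first else result
  result.items

-- ===== PORT B =====
-- _hits(kws, hl, words)
def pvHits (kws : List String) (hl : String) (words : List String) : Bool :=
  kws.contains hl || kws.any (fun k => PySem.Str.isIn k hl) || words.any (fun w => kws.contains w)

-- the body of B's single `for h in headers` loop; state = (field, kws, detected?) triples × first
def pvStepB (h : String) (st : List (String × List String × Option String) × Option String) :
    List (String × List String × Option String) × Option String :=
  if h = "" then st
  else
    let hs := PySem.Str.strip h
    let first := if st.2.isNone && hs != "" then some hs else st.2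
    let hl := PySem.Str.lower hs
    let words := pvWords hl
    (st.1.map (fun e => (e.1, e.2.1,
        match e.2.2 with
        | some v => some v
        | none => if pvHits e.2.1 hl words then some hs else none)), first)

-- B's loop with its early exit: stop as soon as the fallback header is known and no field is unassigned
def pvLoopB : List String → (List (String × List String × Option String) × Option String) →
    List (String × List String × Option String) × Option String
  | [], st => st
  | h :: t, st =>
    if st.2.isSome && st.1.all (fun e => e.2.2.isSome) then st
    else pvLoopB t (pvStepB h st)

def detect_column_mapping_alt (headers : List String) (for_feedback : Bool) : List (String × Option String) :=
  let mapping := if for_feedback then pvFEEDBACK_HEADER_MAP else pvCUSTOMER_HEADER_MAP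
  let init := mapping.items.map (fun p => (p.1, pvLowerSet p.2, (none : Option String)))
  let res := pvLoopB headers (init, none)
  let key := if for_feedback then "text" else "company_name"
  res.1.map (fun e => (e.1,
    if e.1 == key && pvTruthy res.2 && !pvTruthy e.2.2 then res.2 else e.2.2))

-- ===== PRECONDITION & SPEC =====
def Spec_detect_column_mapping (headers : List String) (for_feedback : Bool) (out : List (String × Option String)) : Prop := out = detect_column_mapping_alt headers for_feedback
instance (headers : List String) (for_feedback : Bool) (out : List (String × Option String)) : Decidable (Spec_detect_column_mapping headers for_feedback out) := by unfold Spec_detect_column_mapping; infer_instance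

-- ===== CLAIM (what is proved, stated in full; the proofs are below) =====
def Claim_equal_detect_column_mapping : Prop := ∀ (headers : List String) (for_feedback : Bool), Dom_detect_column_mapping headers for_feedback → Spec_detect_column_mapping headers for_feedback (detect_column_mapping headers for_feedback)

-- ===== LEMMAS AND PROOFS =====

-- first-match-in-header-order, phrased with B's predicate (proof-only)
def pvFM (kws : List String) : List String → Option String
  | [] => none
  | h :: t =>
    if h != "" && pvHits kws (PySem.Str.lower (PySem.Str.strip h))
        (pvWords (PySem.Str.lower (PySem.Str.strip h))) then some (PySem.Str.strip h)
    else pvFM kws t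

theorem pvBoolIfChain {α : Type} (a b c : Bool) (x y : α) :
    (if a then x else if b then x else if c then x else y) = (if a || b || c then x else y) := by
  cases a <;> cases b <;> cases c <;> simp

theorem pvMatchGo_eq_pvFM (kws : List String) (headers : List String) :
    pvMatchGo kws headers = pvFM kws headers := by
  induction headers with
  | nil => rfl
  | cons h t ih =>
    by_cases hh : h = ""
    · simp [pvMatchGo, pvFM, hh, ih]
    · have hb : (h != "") = true := by simp [hh]
      simp only [pvMatchGo, pvFM, pvHits, if_neg hh, ih]
      rw [pvBoolIfChain]; simp only [hb, Bool.true_and]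

theorem pvFoldB_eq (headers : List String)
    (st : List (String × List String × Option String)) (f0 : Option String) :
    headers.foldl (fun st h => pvStepB h st) (st, f0) =
      (st.map (fun e => (e.1, e.2.1,
          match e.2.2 with
          | some v => some v
          | none => pvFM e.2.1 headers)),
       match f0 with
       | some v => some v
       | none => pvFirstHeader headers) := by
  induction headers generalizing st f0 with
  | nil =>
    simp only [List.foldl_nil, pvFM, pvFirstHeader]
    refine Prod.ext ?_ ?_ <;> dsimp only
    · conv_lhs => rw [← List.map_id st]
      apply List.map_congr_left
      intro e _
      rcases e with ⟨f, kws, o⟩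
      cases o <;> rfl
    · cases f0 <;> rfl
  | cons h t ih =>
    rw [List.foldl_cons]
    by_cases hh : h = ""
    · rw [show pvStepB h (st, f0) = (st, f0) from by simp [pvStepB, hh], ih]
      refine Prod.ext ?_ ?_ <;> dsimp only
      · apply List.map_congr_left
        intro e _
        rcases e with ⟨f, kws, o⟩
        cases o <;> simp [pvFM, hh]
      · cases f0 <;> simp [pvFirstHeader, hh]
    · rw [show pvStepB h (st, f0) =
          (st.map (fun e => (e.1, e.2.1,
              match e.2.2 with
              | some v => some v
              | none => if pvHits e.2.1 (PySem.Str.lower (PySem.Str.strip h))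
                    (pvWords (PySem.Str.lower (PySem.Str.strip h))) then some (PySem.Str.strip h)
                  else none)),
           if f0.isNone && PySem.Str.strip h != "" then some (PySem.Str.strip h) else f0)
          from by simp [pvStepB, hh], ih, List.map_map]
      refine Prod.ext ?_ ?_ <;> dsimp only
      · apply List.map_congr_left
        intro e _
        rcases e with ⟨f, kws, o⟩
        cases o with
        | some v => rfl
        | none =>
          rcases (pvHits kws (PySem.Str.lower (PySem.Str.strip h))
              (pvWords (PySem.Str.lower (PySem.Str.strip h)))).eq_false_or_eq_true with hp|hp <;>
            simp [pvFM, hh, hp, Function.comp]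
      · cases f0 with
        | some v => simp
        | none =>
          by_cases hs : PySem.Str.strip h = "" <;> simp [pvFirstHeader, hh, hs]

theorem pvStepB_done (h : String) (st : List (String × List String × Option String) × Option String)
    (hdone : (st.2.isSome && st.1.all (fun e => e.2.2.isSome)) = true) : pvStepB h st = st := by
  simp only [Bool.and_eq_true, List.all_eq_true] at hdone
  unfold pvStepB
  by_cases hh : h = ""
  · rw [if_pos hh]
  · rw [if_neg hh]
    dsimp only
    refine Prod.ext ?_ ?_ <;> dsimp only
    · conv_rhs => rw [← List.map_id st.1]
      apply List.map_congr_left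
      intro e he
      have := hdone.2 e he
      rcases e with ⟨f, kws, o⟩
      cases o
      · simp at this
      · rfl
    · rcases hst : st.2 with _|v
      · rw [hst] at hdone; simp at hdone
      · simp

theorem pvLoopB_eq_foldl (headers : List String)
    (st : List (String × List String × Option String) × Option String) :
    pvLoopB headers st = headers.foldl (fun st h => pvStepB h st) st := by
  induction headers generalizing st with
  | nil => rfl
  | cons h t ih =>
    rw [pvLoopB, List.foldl_cons]
    rcases hd : (st.2.isSome && st.1.all (fun e => e.2.2.isSome)).eq_false_or_eq_true with hg|hg
    · rw [if_pos hg, pvStepB_done h st hg, ← ih]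
      clear ih hd
      induction t with
      | nil => rfl
      | cons h' t' ih' => rw [pvLoopB, if_pos hg]
    · rw [if_neg (by simp [hg]), ih]

-- A's dict build and final fallback vs B's single pass, for any keyword map with distinct
-- field names containing the anchor key
theorem pvMain (headers : List String) (M : PySem.Dict String (List String)) (key : String)
    (hnd : M.keys.Nodup) (hk : key ∈ M.keys) :
    (let result := M.keys.foldl
        (fun r our_field => PySem.Dict.insert r our_field (pvMatchHeader our_field headers M))
        PySem.Dict.empty
     let first := pvFirstHeader headers
     let result := if pvTruthy first && !pvTruthy (PySem.Dict.getD result key none)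
        then PySem.Dict.insert result key first else result
     result.items) =
    (let init := M.items.map (fun p => (p.1, pvLowerSet p.2, (none : Option String)))
     let res := pvLoopB headers (init, none)
     res.1.map (fun e => (e.1,
       if e.1 == key && pvTruthy res.2 && !pvTruthy e.2.2 then res.2 else e.2.2))) := by
  dsimp only
  rw [pvLoopB_eq_foldl, pvFoldB_eq]
  simp only [List.map_map]
  set R := M.keys.foldl
      (fun r our_field => PySem.Dict.insert r our_field (pvMatchHeader our_field headers M))
      PySem.Dict.empty with hR
  have hitems : R.items = M.keys.map (fun f => (f, pvMatchHeader f headers M)) := by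
    rw [hR, PySem.Dict.items_foldl_insert_fresh M.keys (fun f => f)
      (fun f => pvMatchHeader f headers M) PySem.Dict.empty
      (fun a _ => PySem.Dict.contains_empty a) (by simpa using hnd)]
    rfl
  have hRnd : R.keys.Nodup := by
    rw [hR]; exact PySem.Dict.nodup_keys_foldl_insert _ _ _ (by simp)
  have hmemR : (key, pvMatchHeader key headers M) ∈ R.items := by
    rw [hitems]; exact List.mem_map.2 ⟨key, hk, rfl⟩
  have hgetR : PySem.Dict.getD R key none = pvMatchHeader key headers M :=
    PySem.Dict.getD_of_mem_items R hmemR hRnd none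
  have hcont : R.contains key = true := by
    rw [PySem.Dict.contains_iff_mem_keys]
    exact PySem.Dict.mem_keys_of_mem_items R hmemR
  have hgetM : ∀ p ∈ M.items, PySem.Dict.getD M p.1 [] = p.2 := by
    intro p hp
    exact PySem.Dict.getD_of_mem_items M (k := p.1) (v := p.2) (by simpa using hp) hnd []
  have hkeysitems : M.keys = M.items.map (·.1) := rfl
  have hAmap : M.keys.map (fun f => (f, pvMatchHeader f headers M)) =
      M.items.map (fun p => (p.1, pvFM (pvLowerSet p.2) headers)) := by
    rw [hkeysitems, List.map_map]
    apply List.map_congr_left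
    intro p hp
    simp only [Function.comp, pvMatchHeader, hgetM p hp, pvMatchGo_eq_pvFM]
  have hkeyval : ∀ p ∈ M.items, p.1 = key → pvLowerSet p.2 = pvLowerSet (PySem.Dict.getD M key []) := by
    intro p hp hpk
    rw [← hpk, hgetM p hp]
  have hgetR' : PySem.Dict.getD R key none = pvFM (pvLowerSet (PySem.Dict.getD M key [])) headers := by
    rw [hgetR, pvMatchHeader, pvMatchGo_eq_pvFM]
  rcases (pvTruthy (pvFirstHeader headers) &&
      !pvTruthy (PySem.Dict.getD R key none)).eq_false_or_eq_true with hc|hc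
  · -- fallback fires: result[key] = first
    rw [if_pos hc, PySem.Dict.items_insert_of_contains R _ hcont, hitems, hAmap]
    simp only [List.map_map]
    apply List.map_congr_left
    intro p hp
    by_cases hpk : p.1 = key
    · have hvv : pvFM (pvLowerSet p.2) headers = PySem.Dict.getD R key none := by
        rw [hgetR', hkeyval p hp hpk]
      simp only [Function.comp, hpk, beq_self_eq_true, Bool.true_and, hvv, hc]
      simp only [Bool.and_eq_true] at hc
      simp [hc]
    · simp [Function.comp, hpk]
  · -- fallback does not fire
    rw [if_neg (by simp [hc]), hitems, hAmap]
    apply List.map_congr_left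
    intro p hp
    by_cases hpk : p.1 = key
    · have hvv : pvFM (pvLowerSet p.2) headers = PySem.Dict.getD R key none := by
        rw [hgetR', hkeyval p hp hpk]
      simp only [Function.comp_apply]
      simp [hpk, hvv, hc]
    · simp only [Function.comp_apply]
      simp [hpk]

-- ===== VERDICT (by name: the statement is the Claim_ definition above) =====
theorem detect_column_mapping_spec : Claim_equal_detect_column_mapping := by
  intro headers for_feedback _
  unfold Spec_detect_column_mapping detect_column_mapping detect_column_mapping_alt
  cases for_feedback
  · exact pvMain headers pvCUSTOMER_HEADER_MAP "company_name" (by decide) (by decide)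
  · exact pvMain headers pvFEEDBACK_HEADER_MAP "text" (by decide) (by decide)
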